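-- pv_equiv track=rewrite | github.com/EvelynGriffith/text-processing | textanalysis/textanalysis/extract.py | extract_unique_words_paragraphs
-- ===== SOURCE A (Python) =====
-- from typing import List
-- from typing import Set
--
-- def extract_unique_words_paragraphs(paragraphs: List[str]) -> List[Set[str]]:
--     """Extract all of the unique words in each one of the paragraphs."""
--     # go through each of the strings inside of the list and
--     # extract the unique words in each of the paragraphs
--     unique_list = []
--
--     symbols = [",", ".", "---"]
--     for para in paragraphs:
--         lines = para.splitlines()
--         para_set = set()
--
--         for line in lines:
--             line_str = line
--
--             for symbol in symbols:
--                 if symbol in line_str: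
--                     line_str = line_str.replace(symbol, " ")
--
--             line_list = line_str.split()
--
--             for word in line_list:
--                 if word not in para_set:
--                     para_set.add(word)
--
--         unique_list.append(para_set)
--
--     return unique_list
-- ===== SOURCE B (Python) =====
-- from typing import List
-- from typing import Set
--
-- def extract_unique_words_paragraphs(paragraphs: List[str]) -> List[Set[str]]:
--     """Extract all of the unique words in each one of the paragraphs."""
--     # Single character-level scan per paragraph (a small state machine):
--     # build each word one character at a time, closing it on whitespace,
--     # ',' , '.' or a greedy left-to-right '---' match; no replace/split passes.
--     result = []
--     for para in paragraphs:
--         seen = set()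
--         word = []
--         i = 0
--         n = len(para)
--         while i < n:
--             if para[i:i + 3] == "---":
--                 if word:
--                     seen.add("".join(word))
--                     word = []
--                 i += 3
--             else:
--                 c = para[i]
--                 if c in ",." or c.isspace():
--                     if word:
--                         seen.add("".join(word))
--                         word = []
--                 else:
--                     word.append(c)
--                 i += 1
--         if word:
--             seen.add("".join(word))
--         result.append(seen)
--     return result
-- ===== Notes on version B (the rewrite author's own statement) =====
-- stated objective: alternative
-- what changed: A's staged pipeline (splitlines, then guarded replace of ',', '.', '---' per line, then split, then per-word membership loop) is replaced by a single character-level scan per paragraph: a tokenizer state machine that builds each word one character at a time and closes it on whitespace, ',', '.' or a greedy left-to-right '---' match, adding it to the set as it goes.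
import Mathlib
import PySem

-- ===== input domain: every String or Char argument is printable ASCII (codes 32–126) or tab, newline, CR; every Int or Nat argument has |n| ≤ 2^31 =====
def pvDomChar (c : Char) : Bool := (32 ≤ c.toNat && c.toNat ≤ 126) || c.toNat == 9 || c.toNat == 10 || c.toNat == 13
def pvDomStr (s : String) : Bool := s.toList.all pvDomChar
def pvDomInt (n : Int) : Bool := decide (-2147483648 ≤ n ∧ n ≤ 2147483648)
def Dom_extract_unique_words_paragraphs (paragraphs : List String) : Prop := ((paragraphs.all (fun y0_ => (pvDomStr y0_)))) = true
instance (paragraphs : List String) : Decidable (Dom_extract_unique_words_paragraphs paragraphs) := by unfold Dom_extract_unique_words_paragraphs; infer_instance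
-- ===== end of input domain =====

-- B replaces A's staged replace/splitlines/split/set pipeline by a single character-level
-- scan per paragraph (a tokenizer state machine); objective: alternative. Return values
-- proved equal; no side effects involved.

-- ===== PORT A =====
-- Literal transliteration of A: outer loop appends one set per paragraph; inner loops
-- go over splitlines, the symbol list with an 'in' guard, and the words of each line.
def extract_unique_words_paragraphs (paragraphs : List String) : List (List String) :=
  paragraphs.foldl (fun unique_list para =>
    let lines := PySem.Str.splitlines para
    let para_set :=
      lines.foldl (fun para_set line =>
        let line_str :=
          [",", ".", "---"].foldl (fun line_str symbol =>
            if PySem.Str.isIn symbol line_str = true then PySem.Str.replace line_str symbol " " else line_str) line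
        let line_list := PySem.Str.split₀ line_str
        line_list.foldl (fun para_set word =>
          if PySem.Set.contains para_set word = true then para_set
          else PySem.Set.add para_set word) para_set) (PySem.Set.empty (α := String))
    unique_list ++ [para_set]) []

-- ===== PORT B =====
-- Transliteration of B: per paragraph, scan the characters once with a word accumulator,
-- closing the current word on whitespace, ',', '.' or a greedy '---' match.

-- 'para[i:i+3] == "---"' at a position whose head is '-': do the next two chars start '-','-'?
def pvTwoDash : List Char → Bool
  | c :: d :: _ => c == '-' && d == '-'
  | _ => false

-- the while-loop of B: remaining chars, current word (reversed accumulator), seen set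
def pvTokGo : List Char → List Char → PySem.Set String → PySem.Set String
  | [], word, seen =>
      if word.isEmpty then seen else PySem.Set.add seen (String.ofList word.reverse)
  | c :: rest, word, seen =>
      if c == '-' && pvTwoDash rest then
        pvTokGo (rest.drop 2) []
          (if word.isEmpty then seen else PySem.Set.add seen (String.ofList word.reverse))
      else if c == ',' || c == '.' || PySem.Chars.isspace c then
        pvTokGo rest []
          (if word.isEmpty then seen else PySem.Set.add seen (String.ofList word.reverse))
      else
        pvTokGo rest (c :: word) seen
  termination_by cs _ _ => cs.length
  decreasing_by
    · simp only [List.length_drop, List.length_cons]; omega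
    · simp only [List.length_cons]; omega
    · simp only [List.length_cons]; omega

def extract_unique_words_paragraphs_alt (paragraphs : List String) : List (List String) :=
  paragraphs.foldl (fun result para =>
    result ++ [pvTokGo para.toList [] (PySem.Set.empty (α := String))]) []

-- ===== PRECONDITION & SPEC =====
def Spec_extract_unique_words_paragraphs (paragraphs : List String) (out : List (List String)) : Prop := out = extract_unique_words_paragraphs_alt paragraphs
instance (paragraphs : List String) (out : List (List String)) : Decidable (Spec_extract_unique_words_paragraphs paragraphs out) := by unfold Spec_extract_unique_words_paragraphs; infer_instance

-- ===== CLAIM (what is proved, stated in full; the proofs are below) =====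
def Claim_equal_extract_unique_words_paragraphs : Prop := ∀ (paragraphs : List String), Dom_extract_unique_words_paragraphs paragraphs → Spec_extract_unique_words_paragraphs paragraphs (extract_unique_words_paragraphs paragraphs)

-- ===== LEMMAS AND PROOFS =====

-- ---- Chars.replace machinery ----

theorem rgo_succ (old new : List Char) (f : Nat) (c : Char) (t acc : List Char) :
    PySem.Chars.replace.go old new (f+1) (c::t) acc =
      if old.isPrefixOf (c::t) = true then PySem.Chars.replace.go old new f ((c::t).drop old.length) (new.reverse ++ acc)
      else PySem.Chars.replace.go old new f t (c::acc) := rfl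

theorem rgo_zero (old new : List Char) (l acc : List Char) :
    PySem.Chars.replace.go old new 0 l acc = acc.reverse ++ l := rfl

theorem rgo_nil (old new : List Char) (f : Nat) (acc : List Char) :
    PySem.Chars.replace.go old new f [] acc = acc.reverse := by
  cases f <;> simp [PySem.Chars.replace.go]

theorem racc (old new : List Char) (fuel : Nat) :
    ∀ (l acc : List Char), PySem.Chars.replace.go old new fuel l acc = acc.reverse ++ PySem.Chars.replace.go old new fuel l [] := by
  induction fuel with
  | zero => intro l acc; simp [rgo_zero]
  | succ f ih =>
    intro l acc
    cases l with
    | nil => simp [rgo_nil]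
    | cons c t =>
      rw [rgo_succ, rgo_succ]
      split
      · rw [ih _ (new.reverse ++ acc), ih _ (new.reverse ++ [])]; simp
      · rw [ih _ (c :: acc), ih _ [c]]; simp

theorem rfuel (old new : List Char) (hold : old ≠ []) (fuel : Nat) :
    ∀ (l acc : List Char), l.length ≤ fuel → PySem.Chars.replace.go old new fuel l acc = PySem.Chars.replace.go old new l.length l acc := by
  have holdpos : 0 < old.length := List.length_pos_iff.mpr hold
  induction fuel using Nat.strong_induction_on with
  | _ fuel ih =>
  intro l acc h
  match fuel, l with
  | 0, l =>
    have hl : l = [] := List.eq_nil_of_length_eq_zero (Nat.le_zero.mp h)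
    subst hl; rfl
  | f+1, [] => simp [rgo_nil]
  | f+1, c :: t =>
      simp only [List.length_cons]
      rw [rgo_succ, rgo_succ]
      simp only [List.length_cons] at h
      split
      · rw [ih f (by omega) _ _ (by simp; omega),
           ih t.length (by omega) _ _ (by simp; omega)]
      · rw [ih f (by omega) _ _ (by omega)]

theorem replace_eq_go (s old new : List Char) (hold : old ≠ []) :
    PySem.Chars.replace s old new = PySem.Chars.replace.go old new s.length s [] := by
  simp [PySem.Chars.replace, List.isEmpty_iff, hold]

theorem isPrefixOf_cons_false (old ys : List Char) (b : Char) (hb : b ∉ old) (hold : old ≠ []) :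
    old.isPrefixOf (b :: ys) = false := by
  cases old with
  | nil => exact absurd rfl hold
  | cons o os =>
    have hob : o ≠ b := fun h => hb (h ▸ List.mem_cons_self)
    unfold List.isPrefixOf
    simp [hob]

theorem prefix_lands (old xs ys : List Char) (b : Char) (hb : b ∉ old)
    (h : old.isPrefixOf (xs ++ b :: ys) = true) :
    old.isPrefixOf xs = true ∧ old.length ≤ xs.length := by
  rw [List.isPrefixOf_iff_prefix] at h
  have hle : old.length ≤ xs.length := by
    by_contra hlt
    push Not at hlt
    have htake := List.prefix_iff_eq_take.mp h
    have h2 : old[xs.length]? = some b := by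
      rw [htake]
      rw [List.getElem?_take_of_lt hlt, List.getElem?_append_right (le_refl _)]
      simp
    exact hb (List.mem_of_getElem? h2)
  constructor
  · rw [List.isPrefixOf_iff_prefix]
    rw [List.prefix_iff_eq_take.mp h, List.take_append_of_le_length hle]
    exact List.take_prefix _ _
  · exact hle

theorem replace_append_break (old new ys : List Char) (b : Char) (hb : b ∉ old) (hold : old ≠ []) :
    ∀ (n : Nat) (xs : List Char), xs.length = n →
      PySem.Chars.replace (xs ++ b :: ys) old new = PySem.Chars.replace xs old new ++ b :: PySem.Chars.replace ys old new := by
  intro n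
  induction n using Nat.strong_induction_on with
  | _ n ih =>
  intro xs hn
  have holdpos : 0 < old.length := List.length_pos_iff.mpr hold
  rw [replace_eq_go _ _ _ hold, replace_eq_go _ _ _ hold, replace_eq_go _ _ _ hold]
  cases xs with
  | nil =>
    show PySem.Chars.replace.go old new (ys.length + 1) (b :: ys) [] = _
    rw [rgo_succ, if_neg (by simp [isPrefixOf_cons_false old ys b hb hold]), racc]
    simp [rgo_nil]
  | cons c t =>
    have hstep : ((c :: t) ++ b :: ys).length = (t ++ b :: ys).length + 1 := by simp
    rw [hstep, List.cons_append, rgo_succ]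
    by_cases hpre : old.isPrefixOf (c :: (t ++ b :: ys)) = true
    · rw [if_pos hpre]
      have hpre' : old.isPrefixOf ((c :: t) ++ b :: ys) = true := by
        rw [List.cons_append]; exact hpre
      obtain ⟨hpx, hle⟩ := prefix_lands old (c :: t) ys b hb hpre'
      have hdl : (c :: (t ++ b :: ys)).drop old.length = List.drop old.length (c :: t) ++ b :: ys := by
        rw [← List.cons_append]; exact List.drop_append_of_le_length hle
      rw [hdl, racc, rfuel old new hold _ _ _ (by simp at hle ⊢; omega)]
      have hxs' : (List.drop old.length (c :: t)).length < n := by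
        subst hn; simp; omega
      have hrec := ih _ hxs' (List.drop old.length (c :: t)) rfl
      rw [replace_eq_go _ _ _ hold, replace_eq_go _ _ _ hold, replace_eq_go _ _ _ hold] at hrec
      rw [hrec]
      rw [show (c :: t).length = t.length + 1 from rfl, rgo_succ, if_pos hpx]
      rw [racc old new t.length (List.drop old.length (c :: t)) (new.reverse ++ [])]
      rw [rfuel old new hold t.length (List.drop old.length (c :: t)) [] (by simp at hle ⊢; omega)]
      simp [List.length_drop]
    · rw [if_neg hpre]
      have hpre' : ¬ old.isPrefixOf (c :: t) = true := by
        intro hcontra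
        apply hpre
        rw [List.isPrefixOf_iff_prefix] at hcontra ⊢
        rw [← List.cons_append]
        exact hcontra.trans (List.prefix_append _ _)
      rw [racc]
      have hrec := ih t.length (by subst hn; simp) t rfl
      rw [replace_eq_go _ _ _ hold, replace_eq_go _ _ _ hold, replace_eq_go _ _ _ hold] at hrec
      rw [hrec]
      rw [show (c :: t).length = t.length + 1 from rfl, rgo_succ, if_neg hpre']
      rw [racc old new t.length t (c :: [])]
      simp

theorem replace_of_not_infix (old new : List Char) (hold : old ≠ []) :
    ∀ (l : List Char), ¬ old <:+: l →
      PySem.Chars.replace l old new = l := by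
  have key : ∀ (l : List Char) (fuel : Nat) (acc : List Char), l.length ≤ fuel → ¬ old <:+: l →
      PySem.Chars.replace.go old new fuel l acc = acc.reverse ++ l := by
    intro l
    induction l with
    | nil => intro fuel acc _ _; simp [rgo_nil]
    | cons c t ih =>
      intro fuel acc hf hinf
      match fuel with
      | f + 1 =>
        rw [rgo_succ]
        rw [if_neg (by
          intro hp
          exact hinf ((List.isPrefixOf_iff_prefix.mp hp).isInfix))]
        rw [ih f (c :: acc) (by simp at hf; omega) (fun h => hinf (h.trans (List.infix_cons_iff.mpr (Or.inr (List.infix_refl _)) : t <:+: c :: t)))]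
        simp
  intro l hinf
  rw [replace_eq_go _ _ _ hold, key l l.length [] (le_refl _) hinf]
  simp

-- one-step replace equations for an abstract head character
theorem rep_cons_miss (old new : List Char) (hold : old ≠ []) (c : Char) (t : List Char)
    (h : old.isPrefixOf (c :: t) = false) :
    PySem.Chars.replace (c :: t) old new = c :: PySem.Chars.replace t old new := by
  rw [replace_eq_go _ _ _ hold, replace_eq_go _ _ _ hold]
  rw [show (c :: t).length = t.length + 1 from rfl, rgo_succ, if_neg (by simp [h])]
  rw [racc old new t.length t [c]]
  simp

theorem rep_cons_hit (old new : List Char) (hold : old ≠ []) (c : Char) (t : List Char)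
    (h : old.isPrefixOf (c :: t) = true) :
    PySem.Chars.replace (c :: t) old new = new ++ PySem.Chars.replace ((c :: t).drop old.length) old new := by
  have holdpos : 0 < old.length := List.length_pos_iff.mpr hold
  rw [replace_eq_go _ _ _ hold, replace_eq_go _ _ _ hold]
  rw [show (c :: t).length = t.length + 1 from rfl, rgo_succ, if_pos h]
  rw [rfuel old new hold t.length _ _ (by simp [List.length_drop]; omega)]
  rw [racc]
  simp

theorem replace_single (a b : Char) :
    ∀ l, PySem.Chars.replace l [a] [b] = l.map (fun c => if c = a then b else c) := by
  intro l
  induction l with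
  | nil => rfl
  | cons c t ih =>
    by_cases hc : c = a
    · subst hc
      rw [rep_cons_hit [c] [b] (by simp) c t (by simp [List.isPrefixOf])]
      simp [ih]
    · rw [rep_cons_miss [a] [b] (by simp) c t (by simp [List.isPrefixOf]; exact fun h => absurd h.symm hc)]
      simp [ih, hc]

-- ---- Chars.splitlines machinery ----

def pvIsB (c : Char) : Bool :=
  have n := c.toNat;
  decide (n = 10) || decide (n = 13) || decide (n = 11) || decide (n = 12) || decide (n = 28) || decide (n = 29) ||
          decide (n = 30) ||
        decide (n = 133) ||
      decide (n = 8232) ||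
    decide (n = 8233)

theorem splitlines_eq (s : List Char) : PySem.Chars.splitlines s = PySem.Chars.splitlines.go pvIsB s [] [] := rfl

theorem slgo_nil (cur : List Char) (acc : List (List Char)) :
    PySem.Chars.splitlines.go pvIsB [] cur acc =
      if cur.isEmpty then acc.reverse else (cur.reverse :: acc).reverse := rfl

theorem slgo_rn (rest cur : List Char) (acc : List (List Char)) :
    PySem.Chars.splitlines.go pvIsB ('\r'::'\n'::rest) cur acc =
      PySem.Chars.splitlines.go pvIsB rest [] (cur.reverse :: acc) := rfl

theorem slgo_break (c : Char) (rest cur : List Char) (acc : List (List Char))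
    (hB : pvIsB c = true) (hnot : c = '\r' → rest.head? ≠ some '\n') :
    PySem.Chars.splitlines.go pvIsB (c::rest) cur acc =
      PySem.Chars.splitlines.go pvIsB rest [] (cur.reverse :: acc) := by
  rw [PySem.Chars.splitlines.go.eq_def]
  split
  · simp_all
  · rename_i h
    injection h with h1 h2
    subst h1; subst h2
    exact absurd (hnot rfl) (by simp)
  · rename_i hm h
    injection h with h1 h2
    subst h1; subst h2
    simp [hB]

theorem slgo_skip (c : Char) (rest cur : List Char) (acc : List (List Char))
    (hB : pvIsB c = false) :
    PySem.Chars.splitlines.go pvIsB (c::rest) cur acc =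
      PySem.Chars.splitlines.go pvIsB rest (c::cur) acc := by
  rw [PySem.Chars.splitlines.go.eq_def]
  split
  · simp_all
  · rename_i h
    injection h with h1 h2
    subst h1
    exact absurd hB (by simp [pvIsB])
  · rename_i hm h
    injection h with h1 h2
    subst h1; subst h2
    simp [hB]

theorem slacc (n : Nat) :
    ∀ (l cur : List Char) (acc : List (List Char)), l.length = n →
      PySem.Chars.splitlines.go pvIsB l cur acc = acc.reverse ++ PySem.Chars.splitlines.go pvIsB l cur [] := by
  induction n using Nat.strong_induction_on with
  | _ n ih =>
  intro l cur acc hn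
  cases l with
  | nil => rw [slgo_nil, slgo_nil]; split <;> simp
  | cons c rest =>
    by_cases hrn : c = '\r' ∧ rest.head? = some '\n'
    · obtain ⟨rfl, hh⟩ := hrn
      cases rest with
      | nil => simp at hh
      | cons r rs =>
        simp at hh; subst hh
        rw [slgo_rn, slgo_rn]
        rw [ih rs.length (by subst hn; simp only [List.length_cons]; omega) rs [] (cur.reverse :: acc) rfl,
            ih rs.length (by subst hn; simp only [List.length_cons]; omega) rs [] [cur.reverse] rfl]
        simp
    · by_cases hB : pvIsB c = true
      · have hnot : c = '\r' → rest.head? ≠ some '\n' := fun h1 h2 => hrn ⟨h1, h2⟩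
        rw [slgo_break c rest cur acc hB hnot, slgo_break c rest cur [] hB hnot]
        rw [ih rest.length (by subst hn; simp only [List.length_cons]; omega) rest [] (cur.reverse :: acc) rfl,
            ih rest.length (by subst hn; simp only [List.length_cons]; omega) rest [] [cur.reverse] rfl]
        simp
      · rw [slgo_skip c rest cur acc (by simpa using hB), slgo_skip c rest cur [] (by simpa using hB)]
        exact ih rest.length (by subst hn; simp only [List.length_cons]; omega) rest (c :: cur) acc rfl

theorem slskip (xs : List Char) (hxs : ∀ c ∈ xs, pvIsB c = false) :
    ∀ (rest cur : List Char) (acc : List (List Char)),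
      PySem.Chars.splitlines.go pvIsB (xs ++ rest) cur acc = PySem.Chars.splitlines.go pvIsB rest (xs.reverse ++ cur) acc := by
  induction xs with
  | nil => intro rest cur acc; simp
  | cons c t ih =>
    intro rest cur acc
    rw [List.cons_append, slgo_skip c (t ++ rest) cur acc (hxs c List.mem_cons_self)]
    rw [ih (fun d hd => hxs d (List.mem_cons_of_mem c hd)) rest (c :: cur) acc]
    simp

theorem splitlines_breakfree (cs : List Char) (hcs : ∀ c ∈ cs, pvIsB c = false) :
    PySem.Chars.splitlines cs = if cs.isEmpty then [] else [cs] := by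
  rw [splitlines_eq, show cs = cs ++ [] by simp, slskip cs (by simpa using hcs) [] [] []]
  rw [slgo_nil]
  cases cs <;> simp

theorem splitlines_break (xs ys : List Char) (b : Char) (hxs : ∀ c ∈ xs, pvIsB c = false)
    (hB : pvIsB b = true) (hnot : b = '\r' → ys.head? ≠ some '\n') :
    PySem.Chars.splitlines (xs ++ b :: ys) = xs :: PySem.Chars.splitlines ys := by
  rw [splitlines_eq, slskip xs hxs (b :: ys) [] [], slgo_break b ys _ [] hB hnot]
  rw [slacc ys.length ys [] _ rfl]
  simp [splitlines_eq]

theorem splitlines_rn (xs ys : List Char) (hxs : ∀ c ∈ xs, pvIsB c = false) :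
    PySem.Chars.splitlines (xs ++ '\r' :: '\n' :: ys) = xs :: PySem.Chars.splitlines ys := by
  rw [splitlines_eq, slskip xs hxs ('\r' :: '\n' :: ys) [] [], slgo_rn]
  rw [slacc ys.length ys [] _ rfl]
  simp [splitlines_eq]

theorem first_break (cs : List Char) :
    (∀ c ∈ cs, pvIsB c = false) ∨
      ∃ xs b ys, cs = xs ++ b :: ys ∧ (∀ c ∈ xs, pvIsB c = false) ∧ pvIsB b = true := by
  induction cs with
  | nil => left; simp
  | cons c t ih =>
    by_cases hc : pvIsB c = true
    · right; exact ⟨[], c, t, by simp, by simp, hc⟩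
    · cases ih with
      | inl h =>
        left
        intro d hd
        rcases List.mem_cons.mp hd with rfl | hd
        · simpa using hc
        · exact h d hd
      | inr h =>
        obtain ⟨xs, b, ys, rfl, h1, h2⟩ := h
        right
        exact ⟨c :: xs, b, ys, by simp, by
          intro d hd
          rcases List.mem_cons.mp hd with rfl | hd
          · simpa using hc
          · exact h1 d hd, h2⟩

-- ---- Chars.split₀ machinery ----

theorem sgo_nil (cur : List Char) (acc : List (List Char)) :
    PySem.Chars.split₀.go [] cur acc =
      if cur.isEmpty then acc.reverse else (cur.reverse :: acc).reverse := rfl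

theorem sgo_cons (c : Char) (rest cur : List Char) (acc : List (List Char)) :
    PySem.Chars.split₀.go (c :: rest) cur acc =
      if PySem.Chars.isspace c then
        (if cur.isEmpty then PySem.Chars.split₀.go rest [] acc
         else PySem.Chars.split₀.go rest [] (cur.reverse :: acc))
      else PySem.Chars.split₀.go rest (c :: cur) acc := rfl

theorem split₀_eq (s : List Char) : PySem.Chars.split₀ s = PySem.Chars.split₀.go s [] [] := rfl

theorem sacc (l : List Char) :
    ∀ (cur : List Char) (acc : List (List Char)),
      PySem.Chars.split₀.go l cur acc = acc.reverse ++ PySem.Chars.split₀.go l cur [] := by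
  induction l with
  | nil => intro cur acc; rw [sgo_nil, sgo_nil]; split <;> simp
  | cons c rest ih =>
    intro cur acc
    rw [sgo_cons, sgo_cons]
    by_cases hsp : PySem.Chars.isspace c = true
    · simp only [hsp, if_true]
      by_cases hcur : cur.isEmpty
      · simp only [hcur, if_true]; exact ih [] acc
      · simp only [hcur]
        rw [ih [] (cur.reverse :: acc), ih [] [cur.reverse]]
        simp
    · simp only [Bool.of_not_eq_true hsp]
      exact ih (c :: cur) acc

theorem split₀_append_space (b : Char) (hb : PySem.Chars.isspace b = true) (ys : List Char) :
    ∀ (xs cur : List Char),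
      PySem.Chars.split₀.go (xs ++ b :: ys) cur [] =
        PySem.Chars.split₀.go xs cur [] ++ PySem.Chars.split₀.go ys [] [] := by
  intro xs
  induction xs with
  | nil =>
    intro cur
    rw [List.nil_append, sgo_cons, sgo_nil]
    simp only [hb, if_true]
    by_cases hcur : cur.isEmpty
    · simp [hcur]
    · simp only [hcur]
      rw [sacc ys [] [cur.reverse]]
      simp
  | cons c t ih =>
    intro cur
    rw [List.cons_append, sgo_cons, sgo_cons]
    by_cases hsp : PySem.Chars.isspace c = true
    · simp only [hsp, if_true]
      by_cases hcur : cur.isEmpty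
      · simp only [hcur, if_true]; exact ih []
      · simp only [hcur]
        rw [sacc (t ++ b :: ys) [] [cur.reverse], ih [], sacc t [] [cur.reverse]]
        simp
    · simp only [Bool.of_not_eq_true hsp]
      exact ih (c :: cur)

theorem split₀_append (b : Char) (hb : PySem.Chars.isspace b = true) (xs ys : List Char) :
    PySem.Chars.split₀ (xs ++ b :: ys) = PySem.Chars.split₀ xs ++ PySem.Chars.split₀ ys := by
  rw [split₀_eq, split₀_eq, split₀_eq]
  exact split₀_append_space b hb ys xs []

theorem pvIsB_isspace (c : Char) (h : pvIsB c = true) : PySem.Chars.isspace c = true := by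
  simp [pvIsB, PySem.Chars.isspace] at *
  omega

-- ---- the word-level core: per-line cleaning + splitting = whole-paragraph cleaning + splitting ----

def cleanChars (cs : List Char) : List Char :=
  PySem.Chars.replace (PySem.Chars.replace (PySem.Chars.replace cs [','] [' ']) ['.'] [' ']) ['-','-','-'] [' ']

theorem pvIsB_not_sym (b : Char) (hB : pvIsB b = true) : b ∉ [','] ∧ b ∉ ['.'] ∧ b ∉ ['-','-','-'] := by
  refine ⟨?_, ?_, ?_⟩ <;> intro hmem <;> simp at hmem
  · exact absurd (hmem ▸ hB) (by decide)
  · exact absurd (hmem ▸ hB) (by decide)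
  · exact absurd (hmem ▸ hB) (by decide)

theorem clean_append_break (xs ys : List Char) (b : Char) (hB : pvIsB b = true) :
    cleanChars (xs ++ b :: ys) = cleanChars xs ++ b :: cleanChars ys := by
  obtain ⟨h1, h2, h3⟩ := pvIsB_not_sym b hB
  unfold cleanChars
  rw [replace_append_break [','] [' '] ys b h1 (by simp) xs.length xs rfl]
  rw [replace_append_break ['.'] [' '] _ b h2 (by simp) _ _ rfl]
  rw [replace_append_break ['-','-','-'] [' '] _ b h3 (by simp) _ _ rfl]

theorem clean_nil : cleanChars [] = [] := rfl

theorem split₀_clean_flatMap (n : Nat) :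
    ∀ (cs : List Char), cs.length = n →
      PySem.Chars.split₀ (cleanChars cs) =
        (PySem.Chars.splitlines cs).flatMap (fun l => PySem.Chars.split₀ (cleanChars l)) := by
  induction n using Nat.strong_induction_on with
  | _ n ih =>
  intro cs hn
  rcases first_break cs with hfree | ⟨xs, b, ys, rfl, hxs, hB⟩
  · rw [splitlines_breakfree cs hfree]
    cases cs with
    | nil => simp [clean_nil, split₀_eq, sgo_nil]
    | cons c t => simp
  · by_cases hrn : b = '\r' ∧ ys.head? = some '\n'
    · obtain ⟨rfl, hh⟩ := hrn
      cases ys with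
      | nil => simp at hh
      | cons y ys' =>
        simp at hh; subst hh
        rw [splitlines_rn xs ys' hxs]
        rw [clean_append_break xs ('\n' :: ys') '\r' (by decide)]
        rw [show ('\n' : Char) :: ys' = [] ++ '\n' :: ys' from rfl,
            clean_append_break [] ys' '\n' (by decide), clean_nil, List.nil_append]
        rw [split₀_append '\r' (by decide), show ('\n' : Char) :: cleanChars ys' = [] ++ '\n' :: cleanChars ys' from rfl,
            split₀_append '\n' (by decide) [] (cleanChars ys')]
        rw [List.flatMap_cons, ← ih ys'.length (by subst hn; simp only [List.length_append, List.length_cons]; omega) ys' rfl]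
        simp [split₀_eq, sgo_nil]
    · have hnot : b = '\r' → ys.head? ≠ some '\n' := fun h1 h2 => hrn ⟨h1, h2⟩
      rw [splitlines_break xs ys b hxs hB hnot]
      rw [clean_append_break xs ys b hB]
      rw [split₀_append b (pvIsB_isspace b hB)]
      rw [List.flatMap_cons, ← ih ys.length (by subst hn; simp only [List.length_append, List.length_cons]; omega) ys rfl]

-- ---- string-level glue (A side) ----

def cleanStr (s : String) : String :=
  PySem.Str.replace (PySem.Str.replace (PySem.Str.replace s "," " ") "." " ") "---" " "

theorem toList_cleanStr (s : String) : (cleanStr s).toList = cleanChars s.toList := by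
  simp [cleanStr, cleanChars, PySem.Str.replace]

theorem guard_replace (s sym : String) (hsym : sym.toList ≠ []) :
    (if PySem.Str.isIn sym s = true then PySem.Str.replace s sym " " else s) = PySem.Str.replace s sym " " := by
  by_cases h : PySem.Str.isIn sym s = true
  · rw [if_pos h]
  · rw [if_neg h]
    have hni : ¬ sym.toList <:+: s.toList := by
      rw [← PySem.Str.isIn_iff_infix]
      simpa using h
    have := replace_of_not_infix sym.toList (" " : String).toList hsym s.toList hni
    rw [PySem.Str.replace, this, String.ofList_toList]

theorem symbol_fold (line : String) :
    [",", ".", "---"].foldl (fun line_str symbol =>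
        if PySem.Str.isIn symbol line_str = true then PySem.Str.replace line_str symbol " " else line_str) line
      = cleanStr line := by
  simp only [List.foldl_cons, List.foldl_nil]
  rw [guard_replace line "," (by decide)]
  rw [guard_replace _ "." (by decide)]
  rw [guard_replace _ "---" (by decide)]
  rfl

theorem addIf_eq_add : (fun (para_set : PySem.Set String) (word : String) =>
    if PySem.Set.contains para_set word = true then para_set
    else PySem.Set.add para_set word) = PySem.Set.add := by
  funext ps w
  unfold PySem.Set.contains PySem.Set.add
  simp

theorem words_flatMap (para : String) :
    (PySem.Str.splitlines para).flatMap (fun line => PySem.Str.split₀ (cleanStr line))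
      = PySem.Str.split₀ (cleanStr para) := by
  have hline : ∀ (l : List Char),
      PySem.Str.split₀ (cleanStr (String.ofList l)) = (PySem.Chars.split₀ (cleanChars l)).map String.ofList := by
    intro l
    rw [PySem.Str.split₀, toList_cleanStr, String.toList_ofList]
  rw [PySem.Str.splitlines, List.flatMap_map]
  simp only [hline]
  rw [← List.map_flatMap]
  rw [← split₀_clean_flatMap para.toList.length para.toList rfl]
  rw [PySem.Str.split₀, toList_cleanStr]

theorem para_set_eq (para : String) :
    (PySem.Str.splitlines para).foldl (fun para_set line =>
        let line_str :=
          [",", ".", "---"].foldl (fun line_str symbol =>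
            if PySem.Str.isIn symbol line_str = true then PySem.Str.replace line_str symbol " " else line_str) line
        let line_list := PySem.Str.split₀ line_str
        line_list.foldl (fun para_set word =>
          if PySem.Set.contains para_set word = true then para_set
          else PySem.Set.add para_set word) para_set) (PySem.Set.empty (α := String))
      = PySem.Set.ofList (PySem.Str.split₀ (cleanStr para)) := by
  simp only [symbol_fold, addIf_eq_add]
  rw [← words_flatMap para, PySem.Set.ofList, ← List.foldl_flatMap]

-- ---- B side: the tokenizer equals clean-then-split ----

-- the word list the tokenizer emits (proof-side shadow of pvTokGo without the set)
def pvToks : List Char → List Char → List (List Char)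
  | [], word => if word.isEmpty then [] else [word.reverse]
  | c :: rest, word =>
      if c == '-' && pvTwoDash rest then
        (if word.isEmpty then [] else [word.reverse]) ++ pvToks (rest.drop 2) []
      else if c == ',' || c == '.' || PySem.Chars.isspace c then
        (if word.isEmpty then [] else [word.reverse]) ++ pvToks rest []
      else
        pvToks rest (c :: word)
  termination_by cs _ => cs.length
  decreasing_by
    · simp only [List.length_drop, List.length_cons]; omega
    · simp only [List.length_cons]; omega
    · simp only [List.length_cons]; omega

theorem tokGo_foldl (n : Nat) :
    ∀ (cs word : List Char) (seen : PySem.Set String), cs.length = n →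
      pvTokGo cs word seen =
        List.foldl PySem.Set.add seen ((pvToks cs word).map String.ofList) := by
  induction n using Nat.strong_induction_on with
  | _ n ih =>
  intro cs word seen hn
  cases cs with
  | nil =>
    simp only [pvTokGo, pvToks]
    by_cases hw : word.isEmpty <;> simp [hw]
  | cons c rest =>
    simp only [pvTokGo, pvToks]
    by_cases h3 : (c == '-' && pvTwoDash rest) = true
    · simp only [h3, if_true]
      rw [ih (rest.drop 2).length (by subst hn; simp only [List.length_drop, List.length_cons]; omega) _ _ _ rfl]
      by_cases hw : word.isEmpty <;> simp [hw]
    · simp only [h3, if_false, Bool.false_eq_true]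
      by_cases hsep : (c == ',' || c == '.' || PySem.Chars.isspace c) = true
      · simp only [hsep, if_true]
        rw [ih rest.length (by subst hn; simp only [List.length_cons]; omega) _ _ _ rfl]
        by_cases hw : word.isEmpty <;> simp [hw]
      · simp only [hsep, if_false, Bool.false_eq_true]
        exact ih rest.length (by subst hn; simp only [List.length_cons]; omega) rest (c :: word) seen rfl

-- the single-step replacement ',' , '.' → ' '
def pvF (c : Char) : Char := if c = ',' then ' ' else if c = '.' then ' ' else c

theorem clean_eq_mapF (cs : List Char) :
    cleanChars cs = PySem.Chars.replace (cs.map pvF) ['-','-','-'] [' '] := by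
  unfold cleanChars
  rw [replace_single, replace_single, List.map_map]
  rw [show ((fun c => if c = '.' then ' ' else c) ∘ fun c => if c = ',' then ' ' else c) = pvF by
    funext c
    by_cases h1 : c = ','
    · simp [pvF, h1]
    · by_cases h2 : c = '.'
      · simp [pvF, h1, h2]
      · show (if (if c = ',' then ' ' else c) = '.' then ' ' else if c = ',' then ' ' else c) = pvF c
        rw [show (if c = ',' then ' ' else c) = c from if_neg h1, if_neg h2]
        simp [pvF, h1, h2]]

theorem pvF_dash (c : Char) : (pvF c = '-') ↔ (c = '-') := by
  unfold pvF
  split_ifs with h1 h2 <;> simp_all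

theorem clean_cons_nondash (c : Char) (rest : List Char) (h : pvF c ≠ '-') :
    cleanChars (c :: rest) = pvF c :: cleanChars rest := by
  rw [clean_eq_mapF, clean_eq_mapF, List.map_cons]
  rw [rep_cons_miss _ _ (by simp) _ _ (by simp [List.isPrefixOf]; exact fun hh => absurd hh.symm h)]

theorem clean_dash3 (rest : List Char) :
    cleanChars ('-' :: '-' :: '-' :: rest) = ' ' :: cleanChars rest := by
  rw [clean_eq_mapF, clean_eq_mapF]
  simp only [List.map_cons]
  have hF : pvF '-' = '-' := by decide
  rw [hF]
  rw [rep_cons_hit _ _ (by simp) _ _ (by simp [List.isPrefixOf])]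
  rfl

theorem clean_dash1 (rest : List Char) (h : pvTwoDash rest = false) :
    cleanChars ('-' :: rest) = '-' :: cleanChars rest := by
  rw [clean_eq_mapF, clean_eq_mapF, List.map_cons]
  have hF : pvF '-' = '-' := by decide
  rw [hF]
  have hpre : ['-', '-', '-'].isPrefixOf ('-' :: List.map pvF rest) = false := by
    cases rest with
    | nil => decide
    | cons d t =>
      cases t with
      | nil =>
        simp [List.isPrefixOf]
      | cons e u =>
        simp only [pvTwoDash, Bool.and_eq_false_iff, beq_eq_false_iff_ne, ne_eq] at h
        simp only [List.map_cons, List.isPrefixOf]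
        rcases h with h | h
        · have hd : pvF d ≠ '-' := (pvF_dash d).not.mpr h
          simp [Ne.symm hd]
        · have he : pvF e ≠ '-' := (pvF_dash e).not.mpr h
          simp [Ne.symm he]
  rw [rep_cons_miss _ _ (by simp) _ _ hpre]

theorem toks_eq_split (n : Nat) :
    ∀ (cs word : List Char), cs.length = n →
      pvToks cs word = PySem.Chars.split₀.go (cleanChars cs) word [] := by
  induction n using Nat.strong_induction_on with
  | _ n ih =>
  intro cs word hn
  cases cs with
  | nil =>
    simp only [pvToks, clean_nil, sgo_nil]
    by_cases hw : word.isEmpty <;> simp [hw]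
  | cons c rest =>
    simp only [pvToks]
    by_cases h3 : (c == '-' && pvTwoDash rest) = true
    · rw [if_pos h3]
      simp only [Bool.and_eq_true, beq_iff_eq] at h3
      obtain ⟨rfl, h2⟩ := h3
      cases rest with
      | nil => simp [pvTwoDash] at h2
      | cons d t =>
        cases t with
        | nil => simp [pvTwoDash] at h2
        | cons e u =>
          simp only [pvTwoDash, Bool.and_eq_true, beq_iff_eq] at h2
          obtain ⟨rfl, rfl⟩ := h2
          rw [clean_dash3, sgo_cons, if_pos (by decide : PySem.Chars.isspace ' ' = true)]
          have hIH := ih u.length (by subst hn; simp only [List.length_cons]; omega) u [] rfl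
          simp only [List.drop_succ_cons, List.drop_zero]
          by_cases hw : word.isEmpty = true
          · rw [if_pos hw, if_pos hw]; simpa using hIH
          · rw [if_neg hw, if_neg hw, sacc (cleanChars u) [] [word.reverse]]
            simp [hIH]
    · rw [if_neg h3]
      by_cases hsep : (c == ',' || c == '.' || PySem.Chars.isspace c) = true
      · rw [if_pos hsep]
        have hcs : pvF c ≠ '-' ∧ PySem.Chars.isspace (pvF c) = true := by
          rcases (by simpa using hsep : (c = ',' ∨ c = '.') ∨ PySem.Chars.isspace c = true) with (rfl | rfl) | hs
          · exact ⟨by decide, by decide⟩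
          · exact ⟨by decide, by decide⟩
          · have hc1 : c ≠ ',' := fun h => by rw [h] at hs; exact absurd hs (by decide)
            have hc2 : c ≠ '.' := fun h => by rw [h] at hs; exact absurd hs (by decide)
            have hf : pvF c = c := by simp [pvF, hc1, hc2]
            refine ⟨?_, by rw [hf]; exact hs⟩
            rw [hf]; intro h; rw [h] at hs; exact absurd hs (by decide)
        rw [clean_cons_nondash c rest hcs.1, sgo_cons, if_pos hcs.2]
        have hIH := ih rest.length (by subst hn; simp only [List.length_cons]; omega) rest [] rfl
        by_cases hw : word.isEmpty = true
        · rw [if_pos hw, if_pos hw]; simpa using hIH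
        · rw [if_neg hw, if_neg hw, sacc (cleanChars rest) [] [word.reverse]]
          simp [hIH]
      · rw [if_neg hsep]
        have hc : (¬ c = ',' ∧ ¬ c = '.') ∧ PySem.Chars.isspace c = false := by
          simpa using hsep
        by_cases hcd : c = '-'
        · subst hcd
          have h2 : pvTwoDash rest = false := by simpa using h3
          rw [clean_dash1 rest h2, sgo_cons, if_neg (by decide : ¬ PySem.Chars.isspace '-' = true)]
          exact ih rest.length (by subst hn; simp only [List.length_cons]; omega) rest ('-' :: word) rfl
        · have hf : pvF c = c := by simp [pvF, hc.1.1, hc.1.2]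
          rw [clean_cons_nondash c rest (by rw [hf]; exact hcd), hf, sgo_cons, if_neg (by simp [hc.2])]
          exact ih rest.length (by subst hn; simp only [List.length_cons]; omega) rest (c :: word) rfl

theorem tokGo_eq (para : String) :
    pvTokGo para.toList [] (PySem.Set.empty (α := String)) = PySem.Set.ofList (PySem.Str.split₀ (cleanStr para)) := by
  rw [tokGo_foldl para.toList.length _ _ _ rfl, toks_eq_split para.toList.length _ _ rfl]
  rw [← split₀_eq, PySem.Str.split₀, toList_cleanStr, PySem.Set.ofList]

-- ===== VERDICT (by name: the statement is the Claim_ definition above) =====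
theorem extract_unique_words_paragraphs_spec : Claim_equal_extract_unique_words_paragraphs := by
  intro paragraphs _
  unfold Spec_extract_unique_words_paragraphs extract_unique_words_paragraphs extract_unique_words_paragraphs_alt
  rw [PySem.List.foldl_append_singleton_eq_map, PySem.List.foldl_append_singleton_eq_map]
  simp only [para_set_eq, tokGo_eq]
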